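-- pv_equiv track=rewrite | github.com/jbell1991/code-challenges | challenges/leetcode/defang_ip/defang_ip.py | defang_ip
-- ===== SOURCE A (Python) =====
-- def defang_ip(address):
--     # one line solution using .replace method
--     # return address.replace('.', '[.]')
--     # empty string
--     defanged_ip = ""
--     # iterate over each char in the address
--     for char in address:
--         # if char is a .
--         if char == ".":
--             # set it to [.]
--             defanged_ip += "[.]"
--         else:
--             defanged_ip += char
--     # return defanged ip
--     return defanged_ip
-- ===== SOURCE B (Python) =====
-- def defang_ip(address):
--     # tokenize on '.' and rejoin with '[.]'
--     return "[.]".join(address.split("."))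
-- ===== Notes on version B (the rewrite author's own statement) =====
-- stated objective: simpler
-- what changed: Replaces the char-by-char loop with a conditional accumulator by a single split-on-delimiter then join-with-replacement tokenization; a timing run measured B faster (str.join avoids repeated string concatenation).
import Mathlib
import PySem

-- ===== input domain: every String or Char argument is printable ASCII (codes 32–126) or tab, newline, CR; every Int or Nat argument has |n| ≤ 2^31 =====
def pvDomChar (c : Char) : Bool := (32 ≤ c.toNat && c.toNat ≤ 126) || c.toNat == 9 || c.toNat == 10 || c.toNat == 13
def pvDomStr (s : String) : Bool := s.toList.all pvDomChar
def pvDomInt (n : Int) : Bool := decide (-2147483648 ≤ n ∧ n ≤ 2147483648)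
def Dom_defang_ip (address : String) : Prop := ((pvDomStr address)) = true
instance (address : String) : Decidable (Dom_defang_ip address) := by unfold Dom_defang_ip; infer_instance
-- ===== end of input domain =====

-- B replaces A's char-by-char accumulation with split('.') + '[.]'.join; objective: simpler.


-- ===== PORT A =====
-- loop over each char, appending "[.]" for '.' and the char otherwise
def defang_ip (address : String) : String :=
  String.ofList (address.toList.foldl
    (fun acc c => acc ++ (if c == '.' then ['[', '.', ']'] else [c])) [])

-- ===== PORT B =====
-- '[.]'.join(address.split('.'))
def defang_ip_alt (address : String) : String :=
  String.ofList (PySem.Chars.join "[.]".toList (PySem.Chars.splitOn address.toList ['.']))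

-- ===== PRECONDITION & SPEC =====
def Spec_defang_ip (address : String) (out : String) : Prop := out = defang_ip_alt address
instance (address : String) (out : String) : Decidable (Spec_defang_ip address out) := by unfold Spec_defang_ip; infer_instance

-- ===== CLAIM (what is proved, stated in full; the proofs are below) =====
def Claim_equal_defang_ip : Prop := ∀ (address : String), Dom_defang_ip address → Spec_defang_ip address (defang_ip address)

-- ===== LEMMAS AND PROOFS =====

-- structural reference versions used only by the proofs
def pvDefang : List Char → List Char
  | [] => []
  | c :: rest => (if c == '.' then ['[', '.', ']'] else [c]) ++ pvDefang rest

def pvSplitAux : List Char → List Char → List (List Char)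
  | [], cur => [cur.reverse]
  | c :: rest, cur => if c == '.' then cur.reverse :: pvSplitAux rest [] else pvSplitAux rest (c :: cur)

theorem pvSplitAux_ne_nil (l cur : List Char) : pvSplitAux l cur ≠ [] := by
  induction l generalizing cur with
  | nil => simp [pvSplitAux]
  | cons c rest ih =>
    simp only [pvSplitAux]
    split_ifs <;> simp_all

theorem pvFoldl_eq_defang (l : List Char) (acc : List Char) :
    l.foldl (fun a c => a ++ (if c == '.' then ['[', '.', ']'] else [c])) acc
    = acc ++ pvDefang l := by
  induction l generalizing acc with
  | nil => simp [pvDefang]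
  | cons c rest ih => rw [List.foldl_cons, ih]; simp [pvDefang]

theorem pvGo_eq_splitAux (fuel : Nat) (l cur : List Char) (acc : List (List Char))
    (h : l.length ≤ fuel) :
    PySem.Chars.splitOn.go ['.'] fuel l cur acc = acc.reverse ++ pvSplitAux l cur := by
  induction fuel generalizing l cur acc with
  | zero =>
    cases l with
    | nil => simp [PySem.Chars.splitOn.go, pvSplitAux]
    | cons c rest => simp at h
  | succ fuel ih =>
    cases l with
    | nil => simp [PySem.Chars.splitOn.go, pvSplitAux]
    | cons c rest =>
      have hlen : rest.length ≤ fuel := Nat.le_of_succ_le_succ (by simpa using h)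
      by_cases hc : c = '.'
      · have hpre : List.isPrefixOf ['.'] (c :: rest) = true := by
          simp [List.isPrefixOf, hc]
        simp only [PySem.Chars.splitOn.go, hpre, if_true]
        rw [ih _ _ _ (by simpa using hlen)]
        simp [pvSplitAux, hc]
      · have hpre : List.isPrefixOf ['.'] (c :: rest) = false := by
          simp only [List.isPrefixOf]
          simp only [Bool.and_eq_false_iff, beq_eq_false_iff_ne, ne_eq]
          exact Or.inl fun h => hc h.symm
        simp only [PySem.Chars.splitOn.go, hpre, Bool.false_eq_true, if_false]
        rw [ih _ _ _ hlen]
        simp [pvSplitAux, hc]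

theorem pvJoin_splitAux (l cur : List Char) :
    PySem.Chars.join ['[', '.', ']'] (pvSplitAux l cur) = cur.reverse ++ pvDefang l := by
  induction l generalizing cur with
  | nil => simp [pvSplitAux, PySem.Chars.join, pvDefang, List.intercalate]
  | cons c rest ih =>
    by_cases hc : c = '.'
    · subst hc
      obtain ⟨x, xs, hx⟩ := List.exists_cons_of_ne_nil (pvSplitAux_ne_nil rest [])
      simp only [pvSplitAux, pvDefang, beq_self_eq_true, if_true, hx,
        PySem.Chars.join_cons_cons]
      rw [← hx, ih]
      simp
    · have hb : (c == '.') = false := by simp [hc]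
      simp only [pvSplitAux, pvDefang, hb, Bool.false_eq_true, if_false]
      rw [ih]
      simp


-- ===== VERDICT (by name: the statement is the Claim_ definition above) =====
theorem defang_ip_spec : Claim_equal_defang_ip := by
  intro address _
  unfold Spec_defang_ip defang_ip defang_ip_alt PySem.Chars.splitOn
  rw [pvFoldl_eq_defang, pvGo_eq_splitAux _ _ _ _ (Nat.le_succ _)]
  rw [show ("[.]".toList) = ['[', '.', ']'] from rfl]
  simp [pvJoin_splitAux]
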